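-- pv_equiv track=rewrite | github.com/hiepchuvanpc/pose-estimation | src/motion_api/main.py | _compress_dtw_path_for_display
-- ===== SOURCE A (Python) =====
-- def _compress_dtw_path_for_display(path: list[tuple[int, int]]) -> list[tuple[int, int]]:
--     """Remove long horizontal/vertical DTW runs that visually freeze one side."""
--     if not path:
--         return []
--
--     compressed: list[tuple[int, int]] = [path[0]]
--     prev_ti, prev_si = path[0]
--     for ti, si in path[1:]:
--         # If only one side advances, replace the last pair to keep progress moving
--         # without replaying identical student/template frames for too long.
--         if ti == prev_ti or si == prev_si:
--             compressed[-1] = (ti, si)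
--         else:
--             compressed.append((ti, si))
--         prev_ti, prev_si = ti, si
--
--     if len(compressed) < 2 and len(path) >= 2:
--         return [path[0], path[-1]]
--     return compressed
-- ===== SOURCE B (Python) =====
-- def _compress_dtw_path_for_display(path: list[tuple[int, int]]) -> list[tuple[int, int]]:
--     """Remove long horizontal/vertical DTW runs that visually freeze one side."""
--     if not path:
--         return []
--     # Keep the point just before every diagonal move (both axes advance),
--     # then the final point; a kept run boundary is exactly what A's
--     # overwrite-the-last-slot loop leaves behind.
--     keep = [p for p, q in zip(path, path[1:]) if p[0] != q[0] and p[1] != q[1]]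
--     if not keep and len(path) >= 2:
--         return [path[0], path[-1]]
--     return keep + [path[-1]]
-- ===== Notes on version B (the rewrite author's own statement) =====
-- stated objective: simpler
-- what changed: Replaces A's stateful loop that mutates the last kept slot with a single zip-of-consecutive-pairs filter: keep the point before every diagonal move and append the final point.
import Mathlib
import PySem

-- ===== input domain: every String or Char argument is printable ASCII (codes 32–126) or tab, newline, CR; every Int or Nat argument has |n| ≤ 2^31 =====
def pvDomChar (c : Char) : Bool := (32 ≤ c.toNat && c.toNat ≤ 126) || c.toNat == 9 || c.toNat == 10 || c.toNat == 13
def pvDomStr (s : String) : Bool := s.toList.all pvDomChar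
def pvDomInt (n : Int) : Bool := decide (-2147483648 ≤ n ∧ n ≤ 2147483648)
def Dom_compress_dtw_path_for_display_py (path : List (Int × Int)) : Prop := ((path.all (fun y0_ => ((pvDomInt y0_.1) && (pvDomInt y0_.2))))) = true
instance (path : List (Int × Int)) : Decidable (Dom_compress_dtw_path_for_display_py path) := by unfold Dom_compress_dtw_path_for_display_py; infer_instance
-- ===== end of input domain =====

-- B replaces A's stateful overwrite-the-last-slot loop with a zip-filter pass (objective: simpler).

-- ===== PORT A =====
-- compressed[-1] = (ti, si): replace the last element of the list
def pvSetLast (l : List (Int × Int)) (x : Int × Int) : List (Int × Int) := l.dropLast ++ [x]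

def compress_dtw_path_for_display_py (path : List (Int × Int)) : List (Int × Int) :=
  match path with
  | [] => []
  | p0 :: rest =>
    let st := rest.foldl
      (fun (acc : List (Int × Int) × (Int × Int)) q =>
        if q.1 = acc.2.1 ∨ q.2 = acc.2.2 then (pvSetLast acc.1 q, q)
        else (acc.1 ++ [q], q))
      ([p0], p0)
    if st.1.length < 2 ∧ 2 ≤ path.length then [p0, rest.getLastD p0]
    else st.1

-- ===== PORT B =====
def compress_dtw_path_for_display_py_alt (path : List (Int × Int)) : List (Int × Int) :=
  match path with
  | [] => []
  | p0 :: rest =>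
    let keep := (((p0 :: rest).zip rest).filter
        (fun pq => decide (pq.1.1 ≠ pq.2.1) && decide (pq.1.2 ≠ pq.2.2))).map (·.1)
    if keep = [] ∧ 2 ≤ path.length then [p0, rest.getLastD p0]
    else keep ++ [rest.getLastD p0]

-- ===== PRECONDITION & SPEC =====
def Spec_compress_dtw_path_for_display_py (path : List (Int × Int)) (out : List (Int × Int)) : Prop := out = compress_dtw_path_for_display_py_alt path
instance (path : List (Int × Int)) (out : List (Int × Int)) : Decidable (Spec_compress_dtw_path_for_display_py path out) := by unfold Spec_compress_dtw_path_for_display_py; infer_instance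

-- ===== CLAIM (what is proved, stated in full; the proofs are below) =====
def Claim_equal_compress_dtw_path_for_display_py : Prop := ∀ (path : List (Int × Int)), Dom_compress_dtw_path_for_display_py path → Spec_compress_dtw_path_for_display_py path (compress_dtw_path_for_display_py path)

-- ===== LEMMAS AND PROOFS =====

-- the "keep" list of B, as a function of the head and the tail
def pvKeep (p : Int × Int) (xs : List (Int × Int)) : List (Int × Int) :=
  (((p :: xs).zip xs).filter
      (fun pq => decide (pq.1.1 ≠ pq.2.1) && decide (pq.1.2 ≠ pq.2.2))).map (·.1)

-- invariant of A's loop: starting from any kept prefix c0 with last slot p,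
-- it ends with c0 ++ (boundary points) ++ [last point]
theorem pvFold_inv (xs : List (Int × Int)) : ∀ (p : Int × Int) (c0 : List (Int × Int)),
    xs.foldl
      (fun (acc : List (Int × Int) × (Int × Int)) q =>
        if q.1 = acc.2.1 ∨ q.2 = acc.2.2 then (pvSetLast acc.1 q, q)
        else (acc.1 ++ [q], q))
      (c0 ++ [p], p)
    = (c0 ++ pvKeep p xs ++ [xs.getLastD p], xs.getLastD p) := by
  induction xs with
  | nil => intro p c0; simp [pvKeep]
  | cons q xs ih =>
    intro p c0
    simp only [List.foldl_cons]
    by_cases h : q.1 = p.1 ∨ q.2 = p.2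
    · have hfilter : pvKeep p (q :: xs) = pvKeep q xs := by
        simp only [pvKeep, List.zip_cons_cons, List.filter_cons]
        have : ¬ (p.1 ≠ q.1 ∧ p.2 ≠ q.2) := by tauto
        simp [this]
      rw [if_pos h]
      have hset : pvSetLast (c0 ++ [p]) q = c0 ++ [q] := by
        simp [pvSetLast]
      rw [hset, ih q c0, hfilter, List.getLastD_cons]
    · have hd : p.1 ≠ q.1 ∧ p.2 ≠ q.2 := by tauto
      have hfilter : pvKeep p (q :: xs) = p :: pvKeep q xs := by
        simp only [pvKeep, List.zip_cons_cons, List.filter_cons]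
        simp [hd.1, hd.2]
      rw [if_neg h]
      have : (fun (acc : List (Int × Int) × (Int × Int)) q =>
        if q.1 = acc.2.1 ∨ q.2 = acc.2.2 then (pvSetLast acc.1 q, q)
        else (acc.1 ++ [q], q)) (c0 ++ [p], p) q = ((c0 ++ [p]) ++ [q], q) := by
        simp [h]
      rw [ih q (c0 ++ [p]), hfilter, List.getLastD_cons]
      simp

-- ===== VERDICT (by name: the statement is the Claim_ definition above) =====
theorem compress_dtw_path_for_display_py_spec : Claim_equal_compress_dtw_path_for_display_py := by
  intro path _
  unfold Spec_compress_dtw_path_for_display_py compress_dtw_path_for_display_py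
    compress_dtw_path_for_display_py_alt
  match path with
  | [] => rfl
  | p0 :: rest =>
    simp only
    have h0 : ([p0] : List (Int × Int)) = [] ++ [p0] := rfl
    rw [h0, pvFold_inv rest p0 []]
    simp only [List.nil_append]
    have hlen : (pvKeep p0 rest ++ [rest.getLastD p0]).length < 2 ↔ pvKeep p0 rest = [] := by
      simp [List.length_append]
    by_cases hk : pvKeep p0 rest = []
    · by_cases h2 : 2 ≤ (p0 :: rest).length
      · rw [if_pos ⟨hlen.mpr hk, h2⟩, if_pos ⟨hk, h2⟩]
      · rw [if_neg (by tauto), if_neg (by tauto)]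
        show pvKeep p0 rest ++ [rest.getLastD p0] = pvKeep p0 rest ++ [rest.getLastD p0]
        rfl
    · rw [if_neg (by rw [hlen]; tauto), if_neg (by tauto)]
      rfl
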